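-- pv_equiv track=rewrite | github.com/Patryk-Rasiak/reversi-minimax | heuristics.py | piece_difference_score
-- ===== SOURCE A (Python) =====
-- from typing import List
--
-- def piece_difference_score(board: List[List[int]], player: int) -> int:
--     """
--     The piece difference score is the difference in the number of players tiles and opponents.
--     """
--     score = 0
--     for row in board:
--         for val in row:
--             if val == player:
--                 score += 1
--             elif val != 0:
--                 score -= 1
--
--     return score
-- ===== SOURCE B (Python) =====
-- from typing import List
-- from collections import Counter
--
-- def piece_difference_score(board: List[List[int]], player: int) -> int:
--     c = Counter(v for row in board for v in row)
--     players = c[player]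
--     opponents = sum(n for v, n in c.items() if v != 0 and v != player)
--     return players - opponents
-- ===== Notes on version B (the rewrite author's own statement) =====
-- stated objective: alternative
-- what changed: Replaces the per-cell branching accumulator with a frequency table: one Counter over the flattened board, then players = c[player] and opponents = sum of counts of distinct non-zero, non-player values.
import Mathlib
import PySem

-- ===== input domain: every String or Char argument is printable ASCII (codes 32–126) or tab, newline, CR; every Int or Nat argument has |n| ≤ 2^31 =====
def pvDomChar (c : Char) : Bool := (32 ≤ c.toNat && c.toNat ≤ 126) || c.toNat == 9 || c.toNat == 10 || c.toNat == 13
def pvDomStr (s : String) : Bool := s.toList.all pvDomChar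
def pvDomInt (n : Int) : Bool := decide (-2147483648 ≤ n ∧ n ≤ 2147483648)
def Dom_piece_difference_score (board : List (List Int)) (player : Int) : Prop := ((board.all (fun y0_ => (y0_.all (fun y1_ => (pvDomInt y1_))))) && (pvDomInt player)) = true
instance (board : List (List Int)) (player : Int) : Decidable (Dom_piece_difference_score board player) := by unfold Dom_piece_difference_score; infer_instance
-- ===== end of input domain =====

-- B replaces the per-cell branching accumulator with a frequency table (Counter) over the
-- flattened board, summing counts of distinct non-zero non-player values; alternative structure.


-- ===== PORT A =====
def piece_difference_score (board : List (List Int)) (player : Int) : Int :=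
  board.foldl (fun score row =>
    row.foldl (fun s v =>
      if v = player then s + 1
      else if v ≠ 0 then s - 1
      else s) score) 0

-- ===== PORT B =====
def piece_difference_score_alt (board : List (List Int)) (player : Int) : Int :=
  let flat := board.flatMap (fun row => row)
  let c := PySem.Dict.counter flat
  let players := c.getD player 0
  let opponents := ((c.items.filter (fun kv => kv.1 != 0 && kv.1 != player)).map (fun kv => kv.2)).sum
  players - opponents

-- ===== PRECONDITION & SPEC =====
def Spec_piece_difference_score (board : List (List Int)) (player : Int) (out : Int) : Prop := out = piece_difference_score_alt board player
instance (board : List (List Int)) (player : Int) (out : Int) : Decidable (Spec_piece_difference_score board player out) := by unfold Spec_piece_difference_score; infer_instance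

-- ===== CLAIM (what is proved, stated in full; the proofs are below) =====
def Claim_equal_piece_difference_score : Prop := ∀ (board : List (List Int)) (player : Int), Dom_piece_difference_score board player → Spec_piece_difference_score board player (piece_difference_score board player)

-- ===== LEMMAS AND PROOFS =====

-- the per-cell contribution of A
def pvCell (player v : Int) : Int :=
  if v = player then 1 else if v ≠ 0 then -1 else 0

theorem pvRow_foldl (player : Int) (row : List Int) (s : Int) :
    row.foldl (fun s v => if v = player then s + 1 else if v ≠ 0 then s - 1 else s) s
      = s + (row.map (pvCell player)).sum := by
  induction row generalizing s with
  | nil => simp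
  | cons x xs ih =>
    simp only [List.foldl_cons, List.map_cons, List.sum_cons, ih, pvCell]
    split_ifs <;> ring

theorem pvBoard_foldl (player : Int) (board : List (List Int)) (s : Int) :
    board.foldl (fun score row =>
        row.foldl (fun s v => if v = player then s + 1 else if v ≠ 0 then s - 1 else s) score) s
      = s + ((board.flatMap (fun row => row)).map (pvCell player)).sum := by
  induction board generalizing s with
  | nil => simp
  | cons r rs ih =>
    simp only [List.foldl_cons, List.flatMap_cons, List.map_append, List.sum_append]
    rw [pvRow_foldl, ih]; ring

theorem pvA_eq_sum (board : List (List Int)) (player : Int) :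
    piece_difference_score board player
      = ((board.flatMap (fun row => row)).map (pvCell player)).sum := by
  unfold piece_difference_score
  rw [pvBoard_foldl]; ring

-- sum of the cell contributions in closed form: count of player minus count of other non-zeros
theorem pvSum_closed (flat : List Int) (player : Int) :
    (flat.map (pvCell player)).sum
      = (flat.count player : Int) - ((flat.filter (fun v => v != 0 && v != player)).length : Int) := by
  induction flat with
  | nil => simp
  | cons x xs ih =>
    simp only [List.map_cons, List.sum_cons, List.count_cons, List.filter_cons, pvCell, ih]
    by_cases hx : x = player
    · subst hx
      simp only [beq_self_eq_true, if_true, bne_self_eq_false, Bool.and_false,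
        Bool.false_eq_true, if_false]
      push_cast; ring
    · have hxp : (x == player) = false := beq_eq_false_iff_ne.mpr hx
      by_cases h0 : x = 0
      · subst h0
        simp only [if_neg hx, ne_eq, not_true_eq_false, if_false, bne_self_eq_false,
          Bool.false_and, Bool.false_eq_true, hxp]
        push_cast; ring
      · have hb0 : (x != (0 : Int)) = true := bne_iff_ne.mpr h0
        have hbp : (x != player) = true := bne_iff_ne.mpr hx
        simp only [if_neg hx, ne_eq, h0, not_false_eq_true, if_true, hb0, hbp, Bool.and_self,
          hxp, Bool.false_eq_true, if_false, List.length_cons]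
        push_cast; ring

-- sum of (if x = k then 1 else 0) over a Nodup filtered key list
theorem pvSum_indicator (ks : List Int) (p : Int → Bool) (x : Int) (hnd : ks.Nodup) :
    (((ks.filter p).map (fun k => if x = k then (1 : Int) else 0)).sum)
      = if p x ∧ x ∈ ks then 1 else 0 := by
  induction ks with
  | nil => simp
  | cons k ks ih =>
    rcases List.nodup_cons.mp hnd with ⟨hk, hnd'⟩
    simp only [List.filter_cons, List.mem_cons]
    by_cases hpk : p k = true
    · simp only [hpk, if_true, List.map_cons, List.sum_cons, ih hnd']
      by_cases hxk : x = k
      · subst hxk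
        simp [hpk, hk]
      · simp [hxk]
    · simp only [hpk, Bool.false_eq_true, if_false]
      rw [ih hnd']
      by_cases hxk : x = k
      · subst hxk; simp [hpk, hk]
      · simp [hxk]

-- sum of counts over the distinct filtered keys equals the filtered length
theorem pvSum_counts (flat : List Int) (ks : List Int) (p : Int → Bool)
    (hnd : ks.Nodup) (hcov : ∀ v ∈ flat, v ∈ ks) :
    (((ks.filter p).map (fun k => (flat.count k : Int))).sum)
      = ((flat.filter p).length : Int) := by
  induction flat with
  | nil => simp
  | cons x xs ih =>
    have hx : x ∈ ks := hcov x (List.mem_cons_self ..)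
    have hcov' : ∀ v ∈ xs, v ∈ ks := fun v hv => hcov v (List.mem_cons_of_mem _ hv)
    have hsplit : (((ks.filter p).map (fun k => ((x :: xs).count k : Int))).sum)
        = (((ks.filter p).map (fun k => (xs.count k : Int))).sum)
          + (((ks.filter p).map (fun k => if x = k then (1 : Int) else 0)).sum) := by
      rw [← List.sum_map_add]
      apply congrArg
      apply List.map_congr_left
      intro k _
      rw [List.count_cons]
      by_cases hxk : x = k
      · subst hxk; simp
      · have hkx : (k == x) = false := beq_eq_false_iff_ne.mpr (fun h => hxk h.symm)
        simp [hxk]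
    rw [hsplit, ih hcov', pvSum_indicator ks p x hnd]
    simp only [List.filter_cons]
    by_cases hpx : p x = true
    · simp only [hpx, if_true, hx, and_self, List.length_cons]
      push_cast; ring
    · simp [hpx]

-- B in closed form
theorem pvB_closed (board : List (List Int)) (player : Int) :
    piece_difference_score_alt board player
      = ((board.flatMap (fun row => row)).count player : Int)
        - (((board.flatMap (fun row => row)).filter (fun v => v != 0 && v != player)).length : Int) := by
  unfold piece_difference_score_alt
  set flat := board.flatMap (fun row => row) with hflat
  simp only [PySem.Dict.getD_counter, PySem.Dict.items_counter]
  congr 1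
  rw [List.filter_map, List.map_map]
  have hfun : (((fun kv : Int × Int => kv.1 != 0 && kv.1 != player)) ∘
      (fun k : Int => (k, (flat.count k : Int)))) = (fun v : Int => v != 0 && v != player) := rfl
  rw [hfun]
  have hmap : ((fun kv : Int × Int => kv.2) ∘ (fun k : Int => (k, (flat.count k : Int))))
      = fun k : Int => (flat.count k : Int) := rfl
  rw [hmap]
  exact pvSum_counts flat (PySem.Set.ofList flat) _ (PySem.Set.nodup_ofList flat)
    (fun v hv => (PySem.Set.mem_ofList flat v).mpr hv)

-- ===== VERDICT (by name: the statement is the Claim_ definition above) =====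
theorem piece_difference_score_spec : Claim_equal_piece_difference_score := by
  intro board player _
  unfold Spec_piece_difference_score
  rw [pvA_eq_sum, pvSum_closed, pvB_closed]
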